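-- pv_equiv track=rewrite | github.com/snissn/grh | summaries/scripts/sanitize_yaml_safe.py | fix_backslashes_in_dq
-- ===== SOURCE A (Python) =====
-- def fix_backslashes_in_dq(line: str) -> str:
--     out = []
--     i = 0
--     in_dq = False
--     while i < len(line):
--         ch = line[i]
--         if ch == '"':
--             # toggle quote state if not escaped
--             if i == 0 or line[i-1] != '\\':
--                 in_dq = not in_dq
--             out.append(ch)
--             i += 1
--             continue
--         if in_dq and ch == '\\':
--             # if already escaped backslash, keep pair
--             if i+1 < len(line) and line[i+1] == '\\':
--                 out.append('\\\\')
--                 i += 2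
--             else:
--                 out.append('\\\\')
--                 i += 1
--             continue
--         out.append(ch)
--         i += 1
--     return ''.join(out)
-- ===== SOURCE B (Python) =====
-- def fix_backslashes_in_dq(line: str) -> str:
--     # Split on every '"'; pieces alternate with the quotes.  A quote toggles the
--     # in-quotes state unless the piece before it ends with a backslash (i.e. the
--     # quote's original predecessor is '\').  Pieces that fall inside double
--     # quotes get every maximal run of backslashes padded to even length.
--     pieces = line.split('"')
--     out = []
--     dq = False
--     for k, p in enumerate(pieces):
--         if k > 0:
--             out.append('"')
--         out.append(_pad_runs(p) if dq else p)
--         if not p.endswith('\\'):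
--             dq = not dq
--     return ''.join(out)
--
--
-- def _pad_runs(seg: str) -> str:
--     # pad each maximal run of backslashes to even length (run of L -> L + L % 2)
--     out = []
--     run = 0
--     for ch in seg:
--         if ch == '\\':
--             run += 1
--         else:
--             out.append('\\' * (run + run % 2))
--             out.append(ch)
--             run = 0
--     out.append('\\' * (run + run % 2))
--     return ''.join(out)
-- ===== Notes on version B (the rewrite author's own statement) =====
-- stated objective: faster
-- what changed: Replaces A's per-character index-jumping scan with lookahead pair-consumption by a decomposition that splits the line on the double-quote character (pieces alternate in/out of quotes; a quote toggles the state unless the previous piece ends with a backslash) and pads every maximal backslash run inside quoted pieces to even length (L -> L + L%2).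
import Mathlib
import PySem

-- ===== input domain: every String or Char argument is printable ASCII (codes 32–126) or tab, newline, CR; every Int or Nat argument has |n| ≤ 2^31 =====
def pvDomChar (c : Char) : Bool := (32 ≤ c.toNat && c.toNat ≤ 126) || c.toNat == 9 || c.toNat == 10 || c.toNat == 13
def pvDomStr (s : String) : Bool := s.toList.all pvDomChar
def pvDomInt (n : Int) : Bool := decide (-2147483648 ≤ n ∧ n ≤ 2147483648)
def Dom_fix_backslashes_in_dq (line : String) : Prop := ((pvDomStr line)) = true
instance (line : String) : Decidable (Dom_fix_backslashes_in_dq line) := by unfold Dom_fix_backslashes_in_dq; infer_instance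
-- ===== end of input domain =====

-- B splits the line on '"' and pads each maximal backslash run inside quoted pieces
-- to even length, instead of A's index-jumping pair scan; objective: faster (measured).

-- ===== PORT A =====
-- literal transliteration of A's while loop: index i, quote state, output list;
-- the getD accesses are guarded by the same bounds checks the Python code performs, so they are exact.
def fixLoopA (cs : List Char) (i : Nat) (in_dq : Bool) (out : List Char) : List Char :=
  if h : i < cs.length then
    let ch := cs[i]
    if ch = '"' then
      let in_dq' := if i = 0 ∨ cs.getD (i-1) ' ' ≠ '\\' then !in_dq else in_dq
      fixLoopA cs (i+1) in_dq' (out ++ [ch])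
    else if in_dq ∧ ch = '\\' then
      if i+1 < cs.length ∧ cs.getD (i+1) ' ' = '\\' then
        fixLoopA cs (i+2) in_dq (out ++ ['\\', '\\'])
      else
        fixLoopA cs (i+1) in_dq (out ++ ['\\', '\\'])
    else fixLoopA cs (i+1) in_dq (out ++ [ch])
  else out
termination_by cs.length - i

def fix_backslashes_in_dq (line : String) : String :=
  String.ofList (fixLoopA line.toList 0 false [])

-- ===== PORT B =====
-- _pad_runs from Source B: fold with a run counter, flushing run + run % 2 backslashes
def padRunsLoop : List Char → Nat → List Char → List Char
  | [], run, out => out ++ List.replicate (run + run % 2) '\\'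
  | c :: r, run, out =>
    if c = '\\' then padRunsLoop r (run + 1) out
    else padRunsLoop r 0 (out ++ List.replicate (run + run % 2) '\\' ++ [c])

def padRuns (seg : List Char) : List Char := padRunsLoop seg 0 []

-- Source B's enumerate loop over the pieces of line.split('"') (Python str.split with a
-- one-character separator is exactly List.splitOn on the characters)
def fixAltLoop : List (List Char) → Nat → Bool → List Char → List Char
  | [], _, _, out => out
  | p :: rest, k, dq, out =>
    let out1 := if k > 0 then out ++ ['"'] else out
    let out2 := out1 ++ (if dq then padRuns p else p)
    let dq' := if p.getLast? = some '\\' then dq else !dq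
    fixAltLoop rest (k+1) dq' out2

def fix_backslashes_in_dq_alt (line : String) : String :=
  String.ofList (fixAltLoop (List.splitOn '"' line.toList) 0 false [])

-- ===== PRECONDITION & SPEC =====
def Spec_fix_backslashes_in_dq (line : String) (out : String) : Prop := out = fix_backslashes_in_dq_alt line
instance (line : String) (out : String) : Decidable (Spec_fix_backslashes_in_dq line out) := by unfold Spec_fix_backslashes_in_dq; infer_instance

-- ===== CLAIM (what is proved, stated in full; the proofs are below) =====
def Claim_equal_fix_backslashes_in_dq : Prop := ∀ (line : String), Dom_fix_backslashes_in_dq line → Spec_fix_backslashes_in_dq line (fix_backslashes_in_dq line)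

-- ===== LEMMAS AND PROOFS =====

-- reference machine: one pass over the characters, carrying the quote state and
-- whether the previous ORIGINAL character was a backslash
def M : List Char → Bool → Bool → List Char
  | [], _, _ => []
  | c :: rest, dq, prev =>
    if c = '"' then '"' :: M rest (if prev then dq else !dq) false
    else if dq ∧ c = '\\' then
      if rest.head? = some '\\' then '\\' :: '\\' :: M rest.tail dq true
      else '\\' :: '\\' :: M rest dq true
    else c :: M rest dq (decide (c = '\\'))
termination_by l _ _ => l.length
decreasing_by all_goals (simp; try omega)

-- greedy pair form of run padding
def padR : List Char → List Char
  | [] => []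
  | c :: r =>
    if c = '\\' then
      if r.head? = some '\\' then '\\' :: '\\' :: padR r.tail
      else '\\' :: '\\' :: padR r
    else c :: padR r
termination_by l => l.length
decreasing_by all_goals (simp; try omega)

-- "previous original character is a backslash", carried across a piece s from initial value p
def prevOf (s : List Char) (p : Bool) : Bool := s.getLastD (if p then '\\' else ' ') == '\\'

theorem prevOf_nil (p : Bool) : prevOf [] p = p := by
  cases p <;> simp [prevOf, List.getLastD]

theorem prevOf_cons (a : Char) (s : List Char) (p : Bool) :
    prevOf (a :: s) p = prevOf s (decide (a = '\\')) := by
  cases s with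
  | nil =>
    by_cases h : a = '\\' <;> simp [prevOf, List.getLastD, h]
  | cons b t => simp [prevOf, List.getLastD]

theorem prevOf_false (s : List Char) : prevOf s false = decide (s.getLast? = some '\\') := by
  simp [prevOf, List.getLastD_eq_getLast?]
  cases h : s.getLast? with
  | none => simp
  | some c => by_cases hc : c = '\\' <;> simp [hc]

-- "previous char is a backslash" seen from index i of A's scan
def pb (cs : List Char) (i : Nat) : Bool := !(i == 0) && (cs.getD (i-1) ' ' == '\\')

theorem M_cons_other (c : Char) (rest : List Char) (dq prev : Bool)
    (hc : (c = '"') = False) (hnd : (dq = true ∧ c = '\\') = False) :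
    M (c :: rest) dq prev = c :: M rest dq (decide (c = '\\')) := by
  simp [M, hc, hnd]

theorem fixLoopA_eq_M (cs : List Char) (i : Nat) (dq : Bool) (out : List Char) :
    fixLoopA cs i dq out = out ++ M (cs.drop i) dq (pb cs i) := by
  induction i, dq, out using fixLoopA.induct cs with
  | case1 i dq out h ch hch0 indq ih =>
    have hch : cs[i] = '"' := hch0
    rw [show fixLoopA cs i dq out
          = fixLoopA cs (i+1) (if i = 0 ∨ cs.getD (i-1) ' ' ≠ '\\' then !dq else dq)
              (out ++ [cs[i]]) by
        rw [fixLoopA]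
        simp [h, hch]]
    have ih' : fixLoopA cs (i+1) (if i = 0 ∨ cs.getD (i-1) ' ' ≠ '\\' then !dq else dq) (out ++ [cs[i]])
        = out ++ [cs[i]] ++ M (List.drop (i+1) cs)
            (if i = 0 ∨ cs.getD (i-1) ' ' ≠ '\\' then !dq else dq) (pb cs (i+1)) := ih
    rw [ih', List.drop_eq_getElem_cons h, hch]
    have hpb1 : pb cs (i+1) = false := by
      simp [pb, List.getElem?_eq_getElem h, hch, List.getD]
    have hdq' : (if i = 0 ∨ cs.getD (i-1) ' ' ≠ '\\' then !dq else dq)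
        = (if pb cs i then dq else !dq) := by
      by_cases h0 : i = 0
      · simp [pb, h0]
      · simp [pb, h0, List.getD]
    rw [hpb1,
        show M ('"' :: cs.drop (i+1)) dq (pb cs i)
          = '"' :: M (cs.drop (i+1)) (if pb cs i then dq else !dq) false by simp [M],
        hdq']
    simp
  | case2 i dq out h ch hch0 hdq0 hnext ih =>
    have hch : (cs[i] = '"') = False := by simpa using hch0
    obtain ⟨hdq', hbs0⟩ := hdq0
    subst hdq'
    have hbs : cs[i] = '\\' := hbs0
    have hnlt : i + 1 < cs.length := hnext.1
    have hc1 : cs[i+1] = '\\' := by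
      rw [← List.getD_eq_getElem cs ' ' hnlt]; exact hnext.2
    rw [show fixLoopA cs i true out = fixLoopA cs (i+2) true (out ++ ['\\', '\\']) by
          rw [fixLoopA]
          simp [h, hbs, hnlt, List.getD, hc1],
        ih, List.drop_eq_getElem_cons h, hbs, List.drop_eq_getElem_cons hnlt]
    have hpb2 : pb cs (i+2) = true := by
      simp [pb, show i+2-1 = i+1 from rfl, List.getD, List.getElem?_eq_getElem hnlt, hc1]
    rw [hc1, hpb2,
        show M ('\\' :: '\\' :: cs.drop (i+2)) true (pb cs i)
          = '\\' :: '\\' :: M (cs.drop (i+2)) true true by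
          simp [M, show ('\\' : Char) ≠ '"' by decide]]
    simp
  | case3 i dq out h ch hch0 hdq0 hnot ih =>
    have hch : (cs[i] = '"') = False := by simpa using hch0
    obtain ⟨hdq', hbs0⟩ := hdq0
    subst hdq'
    have hbs : cs[i] = '\\' := hbs0
    have hhd : (cs[i+1]? = some '\\') = False := by
      by_cases h1 : i+1 < cs.length
      · simp only [List.getElem?_eq_getElem h1, Option.some.injEq, eq_iff_iff, iff_false]
        intro hc
        exact hnot ⟨h1, by rw [List.getD_eq_getElem cs ' ' h1]; exact hc⟩
      · rw [List.getElem?_eq_none_iff.mpr (by omega)]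
        simp
    have hnot' : ¬ (i + 1 < cs.length ∧ cs[i+1]?.getD ' ' = '\\') := by
      simpa [List.getD] using hnot
    rw [show fixLoopA cs i true out = fixLoopA cs (i+1) true (out ++ ['\\', '\\']) by
          rw [fixLoopA]
          simp [h, hbs, hnot', List.getD],
        ih, List.drop_eq_getElem_cons h, hbs]
    have hpb1 : pb cs (i+1) = true := by
      simp [pb, List.getD, List.getElem?_eq_getElem h, hbs]
    rw [hpb1,
        show M ('\\' :: cs.drop (i+1)) true (pb cs i)
          = '\\' :: '\\' :: M (cs.drop (i+1)) true true by
          simp [M, show ('\\' : Char) ≠ '"' by decide, List.head?_drop, hhd]]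
    simp
  | case4 i dq out h ch hch0 hnd0 ih =>
    have hch : (cs[i] = '"') = False := by simpa using hch0
    have hnd : (dq = true ∧ cs[i] = '\\') = False := by simpa using hnd0
    rw [show fixLoopA cs i dq out = fixLoopA cs (i+1) dq (out ++ [cs[i]]) by
          rw [fixLoopA]
          simp [h, hch, hnd]]
    have ih' : fixLoopA cs (i+1) dq (out ++ [cs[i]])
        = out ++ [cs[i]] ++ M (List.drop (i+1) cs) dq (pb cs (i+1)) := ih
    rw [ih', List.drop_eq_getElem_cons h]
    have hb : (cs[i] == '\\') = decide (cs[i] = '\\') := by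
      by_cases hc : cs[i] = '\\' <;> simp [hc]
    have hpb1 : pb cs (i+1) = decide (cs[i] = '\\') := by
      simp [pb, List.getD, List.getElem?_eq_getElem h, hb]
    rw [hpb1, M_cons_other cs[i] (cs.drop (i+1)) dq (pb cs i) hch hnd]
    simp
  | case5 i dq out h =>
    rw [show fixLoopA cs i dq out = out by rw [fixLoopA]; simp [h],
        List.drop_eq_nil_of_le (by omega)]
    simp [M]

theorem M_quotefree_out (s : List Char) (t : List Char) (p : Bool) (hs : '"' ∉ s) :
    M (s ++ t) false p = s ++ M t false (prevOf s p) := by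
  induction s generalizing p with
  | nil => simp [prevOf_nil]
  | cons a s ih =>
    have ha : a ≠ '"' := fun h => hs (by simp [h])
    rw [List.cons_append, show M (a :: (s ++ t)) false p
          = a :: M (s ++ t) false (decide (a = '\\')) by simp [M, ha],
        ih _ (fun h => hs (List.mem_cons_of_mem a h)), prevOf_cons]
    simp

theorem M_quotefree_in (s : List Char) (t : List Char) (p : Bool) (hs : '"' ∉ s)
    (ht : t.head? ≠ some '\\') :
    M (s ++ t) true p = padR s ++ M t true (prevOf s p) := by
  induction s using padR.induct generalizing p with
  | case1 => simp [prevOf_nil, padR]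
  | case2 r hr ih =>
    obtain ⟨rt, hrt⟩ := List.head?_eq_some_iff.mp hr
    have hq : '"' ∉ rt := fun h => hs (by simp [hrt, h])
    have hbq : ('\\' : Char) ≠ '"' := by decide
    have h1 : (r ++ t).head? = some '\\' := by
      rw [List.head?_append_of_ne_nil r (by simp [hrt])]; exact hr
    rw [List.cons_append,
        show M ('\\' :: (r ++ t)) true p
          = '\\' :: '\\' :: M ((r ++ t).tail) true true by simp [M, hbq, h1],
        List.tail_append_of_ne_nil (by simp [hrt] : r ≠ [])]
    rw [show r.tail = rt by simp [hrt]] at ih ⊢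
    rw [ih true hq, show padR ('\\' :: r) = '\\' :: '\\' :: padR rt by
          simp [padR, hrt]]
    rw [prevOf_cons, hrt, prevOf_cons]
    simp
  | case3 r hr ih =>
    have hq : '"' ∉ r := fun h => hs (by simp [h])
    have hbq : ('\\' : Char) ≠ '"' := by decide
    have hhd : (r ++ t).head? ≠ some '\\' := by
      cases r with
      | nil => simpa using ht
      | cons b rb => simpa using (by simpa using hr : b ≠ '\\')
    rw [List.cons_append,
        show M ('\\' :: (r ++ t)) true p = '\\' :: '\\' :: M (r ++ t) true true by
          simp [M, hbq]
          rintro (h | ⟨hre, hth⟩)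
          · exact absurd h hr
          · exact absurd hth ht,
        ih true hq,
        show padR ('\\' :: r) = '\\' :: '\\' :: padR r by simp [padR, hr],
        prevOf_cons]
    simp
  | case4 c r hc ih =>
    have ha : c ≠ '"' := fun h => hs (by simp [h])
    have hq : '"' ∉ r := fun h => hs (by simp [h])
    rw [List.cons_append,
        show M (c :: (r ++ t)) true p = c :: M (r ++ t) true (decide (c = '\\')) by
          simp [M, ha, hc],
        ih _ hq,
        show padR (c :: r) = c :: padR r by simp [padR, hc],
        prevOf_cons]
    simp

theorem padR_replicate (n : Nat) : padR (List.replicate n '\\') = List.replicate (n + n % 2) '\\' := by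
  induction n using Nat.twoStepInduction with
  | zero => simp [padR]
  | one => simp [padR, List.replicate]
  | more n ih _ =>
    have h2 : List.replicate (n + 2) '\\' = '\\' :: '\\' :: List.replicate n '\\' := rfl
    have h3 : (n + 2) + (n + 2) % 2 = (n + n % 2) + 2 := by omega
    rw [h2, h3]
    simp only [padR, List.head?_cons, List.tail_cons, ih]
    rfl

theorem padR_replicate_cons (n : Nat) (c : Char) (r : List Char) (hc : c ≠ '\\') :
    padR (List.replicate n '\\' ++ c :: r) = List.replicate (n + n % 2) '\\' ++ c :: padR r := by
  induction n using Nat.twoStepInduction with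
  | zero => simp [padR, hc]
  | one =>
    have : (some c = some '\\') = False := by simp [hc]
    simp [padR, List.replicate, hc, this]
  | more n ih _ =>
    have h2 : List.replicate (n + 2) '\\' ++ c :: r = '\\' :: '\\' :: (List.replicate n '\\' ++ c :: r) := rfl
    have h3 : (n + 2) + (n + 2) % 2 = (n + n % 2) + 2 := by omega
    rw [h2, h3]
    simp only [padR, List.head?_cons, List.tail_cons, ih]
    rfl

theorem padRunsLoop_eq (s : List Char) (run : Nat) (out : List Char) :
    padRunsLoop s run out = out ++ padR (List.replicate run '\\' ++ s) := by
  induction s generalizing run out with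
  | nil => simp [padRunsLoop, padR_replicate]
  | cons c r ih =>
    by_cases hc : c = '\\'
    · subst hc
      rw [show padRunsLoop ('\\' :: r) run out = padRunsLoop r (run + 1) out by simp [padRunsLoop],
          ih]
      rw [List.replicate_succ', List.append_assoc]
      rfl
    · rw [show padRunsLoop (c :: r) run out
            = padRunsLoop r 0 (out ++ List.replicate (run + run % 2) '\\' ++ [c]) by
          simp [padRunsLoop, hc],
          ih, padR_replicate_cons run c r hc]
      simp

theorem padRuns_eq_padR (s : List Char) : padRuns s = padR s := by
  simpa using padRunsLoop_eq s 0 []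

-- piece-level reference form of B's loop
def G : List (List Char) → Bool → List Char
  | [], _ => []
  | p :: rest, dq =>
    (if dq then padR p else p) ++
      (if rest.isEmpty then []
       else '"' :: G rest (if p.getLast? = some '\\' then dq else !dq))

-- the tail pieces, each preceded by its '"'
def H : List (List Char) → Bool → List Char
  | [], _ => []
  | p :: rest, dq =>
    '"' :: ((if dq then padR p else p) ++ H rest (if p.getLast? = some '\\' then dq else !dq))

theorem fixAltLoop_pos (ps : List (List Char)) (k : Nat) (dq : Bool) (out : List Char) :
    fixAltLoop ps (k+1) dq out = out ++ H ps dq := by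
  induction ps generalizing k dq out with
  | nil => simp [fixAltLoop, H]
  | cons p rest ih =>
    rw [show fixAltLoop (p :: rest) (k+1) dq out
          = fixAltLoop rest (k+2) (if p.getLast? = some '\\' then dq else !dq)
              ((out ++ ['"']) ++ (if dq then padRuns p else p)) by
        simp [fixAltLoop],
        ih, H, padRuns_eq_padR]
    simp

theorem H_eq_G (ps : List (List Char)) (dq : Bool) (hps : ps ≠ []) :
    H ps dq = '"' :: G ps dq := by
  induction ps generalizing dq with
  | nil => exact absurd rfl hps
  | cons p rest ih =>
    cases rest with
    | nil => simp [H, G]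
    | cons q qs =>
      rw [show H (p :: q :: qs) dq
            = '"' :: ((if dq then padR p else p)
                ++ H (q :: qs) (if p.getLast? = some '\\' then dq else !dq)) from rfl,
          ih _ (by simp),
          show G (p :: q :: qs) dq
            = (if dq then padR p else p)
                ++ '"' :: G (q :: qs) (if p.getLast? = some '\\' then dq else !dq) from rfl]

theorem fixAltLoop_zero_eq_G (ps : List (List Char)) (dq : Bool) (hps : ps ≠ []) :
    fixAltLoop ps 0 dq [] = G ps dq := by
  cases ps with
  | nil => exact absurd rfl hps
  | cons p rest =>
    rw [show fixAltLoop (p :: rest) 0 dq []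
          = fixAltLoop rest 1 (if p.getLast? = some '\\' then dq else !dq)
              (if dq then padRuns p else p) by simp [fixAltLoop],
        fixAltLoop_pos, padRuns_eq_padR, G]
    cases rest with
    | nil => simp [H]
    | cons q qs => rw [H_eq_G _ _ (by simp)]; simp [G]

theorem splitOn_quote_cons (t : List Char) :
    List.splitOn '"' ('"' :: t) = [] :: List.splitOn '"' t := by
  simp [List.splitOn, List.splitOnP_cons]

theorem splitOn_ne_quote_cons (a : Char) (t : List Char) (ha : a ≠ '"') :
    List.splitOn '"' (a :: t) = List.modifyHead (List.cons a) (List.splitOn '"' t) := by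
  simp [List.splitOn, List.splitOnP_cons, ha]

theorem splitOn_ne_nil (t : List Char) : List.splitOn '"' t ≠ [] := by
  induction t with
  | nil => simp [List.splitOn, List.splitOnP_nil]
  | cons a t ih =>
    by_cases ha : a = '"'
    · subst ha; simp [splitOn_quote_cons]
    · rw [splitOn_ne_quote_cons a t ha]
      cases h : List.splitOn '"' t with
      | nil => exact absurd h ih
      | cons q qs => simp

theorem splitOn_quotefree (s : List Char) (hs : '"' ∉ s) : List.splitOn '"' s = [s] := by
  induction s with
  | nil => simp [List.splitOn, List.splitOnP_nil]
  | cons a s ih =>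
    have ha : a ≠ '"' := fun h => hs (by simp [h])
    rw [splitOn_ne_quote_cons a s ha, ih (fun h => hs (List.mem_cons_of_mem a h))]
    simp

theorem splitOn_append_quote (s : List Char) (t : List Char) (hs : '"' ∉ s) :
    List.splitOn '"' (s ++ '"' :: t) = s :: List.splitOn '"' t := by
  induction s with
  | nil => simpa using splitOn_quote_cons t
  | cons a s ih =>
    have ha : a ≠ '"' := fun h => hs (by simp [h])
    rw [List.cons_append, splitOn_ne_quote_cons a (s ++ '"' :: t) ha,
        ih (fun h => hs (List.mem_cons_of_mem a h))]
    simp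

theorem dropWhile_quote_head (l : List Char) (a : Char) (t' : List Char)
    (h : List.dropWhile (fun c => !(c == '"')) l = a :: t') : a = '"' := by
  induction l with
  | nil => simp at h
  | cons b bs ihl =>
    rw [List.dropWhile_cons] at h
    by_cases hb : b = '"'
    · simp [hb] at h
      exact h.1.symm
    · simp [hb] at h
      exact ihl h

theorem M_eq_G_aux (n : Nat) (cs : List Char) (hn : cs.length ≤ n) (dq : Bool) :
    M cs dq false = G (List.splitOn '"' cs) dq := by
  induction n generalizing cs dq with
  | zero =>
    have : cs = [] := List.length_eq_zero_iff.mp (Nat.le_zero.mp hn)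
    subst this
    cases dq <;> simp [M, G, padR, List.splitOn, List.splitOnP_nil]
  | succ n ih =>
    by_cases hq : '"' ∈ cs
    · have hd : cs.dropWhile (fun c => !(c == '"')) ≠ [] := by
        intro hnil
        have := List.dropWhile_eq_nil_iff.mp hnil
        simp at this
        exact this '"' hq rfl
      obtain ⟨t, hdt⟩ : ∃ t, cs.dropWhile (fun c => !(c == '"')) = '"' :: t := by
        cases hdw : cs.dropWhile (fun c => !(c == '"')) with
        | nil => exact absurd hdw hd
        | cons a t' =>
          exact ⟨t', by rw [dropWhile_quote_head cs a t' hdw]⟩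
      set s := cs.takeWhile (fun c => !(c == '"')) with hsdef
      have hcs : cs = s ++ '"' :: t := by
        rw [hsdef, ← hdt]; exact (List.takeWhile_append_dropWhile).symm
      have hs : '"' ∉ s := by
        intro hmem
        have := List.mem_takeWhile_imp hmem
        simp at this
      have hlen : t.length ≤ n := by
        have : cs.length = s.length + t.length + 1 := by rw [hcs]; simp; omega
        omega
      have hpv : prevOf s false = decide (s.getLast? = some '\\') := prevOf_false s
      rw [hcs, splitOn_append_quote s t hs]
      obtain ⟨q, qs, hsplit⟩ : ∃ q qs, List.splitOn '"' t = q :: qs := by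
        cases h : List.splitOn '"' t with
        | nil => exact absurd h (splitOn_ne_nil t)
        | cons q qs => exact ⟨q, qs, rfl⟩
      have hGcons : G (s :: q :: qs) dq
          = (if dq then padR s else s)
              ++ '"' :: G (q :: qs) (if s.getLast? = some '\\' then dq else !dq) := rfl
      have hMq : ∀ pv : Bool, M ('"' :: t) dq pv
          = '"' :: M t (if pv then dq else !dq) false := by
        intro pv; simp [M]
      have hM : M (s ++ '"' :: t) dq false
          = (if dq then padR s else s)
              ++ '"' :: M t (if s.getLast? = some '\\' then dq else !dq) false := by
        cases dq
        · rw [M_quotefree_out s ('"' :: t) false hs, hMq (prevOf s false), hpv]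
          by_cases hbl : s.getLast? = some '\\' <;> simp [hbl]
        · rw [M_quotefree_in s ('"' :: t) false hs (by simp), hMq (prevOf s false), hpv]
          by_cases hbl : s.getLast? = some '\\' <;> simp [hbl]
      rw [hM, ih t hlen, hsplit, hGcons]
    · rw [splitOn_quotefree cs hq]
      have h0 : cs = cs ++ [] := by simp
      cases dq
      · rw [show M cs false false = M (cs ++ []) false false by simp,
            M_quotefree_out cs [] false hq]
        simp [M, G]
      · rw [show M cs true false = M (cs ++ []) true false by simp,
            M_quotefree_in cs [] false hq (by simp)]
        simp [M, G]

theorem M_eq_G (cs : List Char) (dq : Bool) :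
    M cs dq false = G (List.splitOn '"' cs) dq := M_eq_G_aux cs.length cs le_rfl dq

-- ===== VERDICT (by name: the statement is the Claim_ definition above) =====
theorem fix_backslashes_in_dq_spec : Claim_equal_fix_backslashes_in_dq := by
  intro line _
  unfold Spec_fix_backslashes_in_dq fix_backslashes_in_dq fix_backslashes_in_dq_alt
  rw [fixLoopA_eq_M, fixAltLoop_zero_eq_G _ _ (splitOn_ne_nil _)]
  simp [pb, M_eq_G]
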